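-- pv_equiv track=rewrite | github.com/morozsm/icom-lan | src/icom_lan/commands.py | _resolve_scope_fixed_edge_range
-- ===== SOURCE A (Python) =====
-- _SCOPE_FIXED_EDGE_RANGE_STARTS_HZ: tuple[int, ...] = (
--     50_000_000,
--     28_000_000,
--     24_890_000,
--     21_000_000,
--     18_068_000,
--     14_000_000,
--     10_100_000,
--     7_000_000,
--     5_250_000,
--     3_500_000,
--     1_800_000,
--     472_000,
--     135_000,
--     10_000,
-- )
--
-- def _resolve_scope_fixed_edge_range(start_hz: int) -> int:
--     if start_hz < 0:
--         raise ValueError(f"scope fixed edge start_hz must be >= 0, got {start_hz}")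
--     for index, band_start in enumerate(_SCOPE_FIXED_EDGE_RANGE_STARTS_HZ, start=1):
--         if start_hz >= band_start:
--             return index
--     raise ValueError(
--         f"scope fixed edge start_hz {start_hz} is outside known IC-7610 bands"
--     )
-- ===== SOURCE B (Python) =====
-- _SCOPE_FIXED_EDGE_RANGE_STARTS_ASC_HZ: tuple[int, ...] = (
--     10_000,
--     135_000,
--     472_000,
--     1_800_000,
--     3_500_000,
--     5_250_000,
--     7_000_000,
--     10_100_000,
--     14_000_000,
--     18_068_000,
--     21_000_000,
--     24_890_000,
--     28_000_000,
--     50_000_000,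
-- )
--
-- def _resolve_scope_fixed_edge_range(start_hz: int) -> int:
--     if start_hz < 0:
--         raise ValueError(f"scope fixed edge start_hz must be >= 0, got {start_hz}")
--     # binary search: lo ends as the number of ascending thresholds <= start_hz
--     lo, hi = 0, 14
--     while lo < hi:
--         mid = (lo + hi) // 2
--         if _SCOPE_FIXED_EDGE_RANGE_STARTS_ASC_HZ[mid] <= start_hz:
--             lo = mid + 1
--         else:
--             hi = mid
--     if lo == 0:
--         raise ValueError(
--             f"scope fixed edge start_hz {start_hz} is outside known IC-7610 bands"
--         )
--     return 15 - lo
-- ===== Notes on version B (the rewrite author's own statement) =====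
-- stated objective: alternative
-- what changed: Replaces the linear first-match scan over descending thresholds with a hand-written binary search (bisect_right) over the ascending thresholds, mapping the insertion point back to the 1-based band index via 15 - lo.
import Mathlib
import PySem

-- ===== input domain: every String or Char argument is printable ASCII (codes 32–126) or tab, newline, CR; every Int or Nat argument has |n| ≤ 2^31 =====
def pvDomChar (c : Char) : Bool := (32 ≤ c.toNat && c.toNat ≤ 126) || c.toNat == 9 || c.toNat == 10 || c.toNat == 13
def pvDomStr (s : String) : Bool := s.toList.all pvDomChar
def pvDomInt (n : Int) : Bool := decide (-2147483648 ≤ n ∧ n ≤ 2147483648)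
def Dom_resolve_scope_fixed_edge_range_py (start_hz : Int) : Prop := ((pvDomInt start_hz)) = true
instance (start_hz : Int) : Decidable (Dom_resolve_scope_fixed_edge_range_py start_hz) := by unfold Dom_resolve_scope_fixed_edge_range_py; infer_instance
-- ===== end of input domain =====

-- B replaces A's linear first-match scan over descending thresholds with a binary
-- search over the ascending thresholds (alternative structure; same exact result).

-- ===== PORT A =====
def pvStartsDescA : List Int :=
  [50000000, 28000000, 24890000, 21000000, 18068000, 14000000, 10100000,
   7000000, 5250000, 3500000, 1800000, 472000, 135000, 10000]

-- the enumerate(..., start=1) loop with early return; [] = the final raise (excluded by Pre_)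
def pvScanA (s : Int) : List Int → Int → Int
  | [], _ => 0
  | b :: rest, i => if s ≥ b then i else pvScanA s rest (i + 1)

def resolve_scope_fixed_edge_range_py (start_hz : Int) : Int :=
  if start_hz < 0 then 0  -- raise, excluded by Pre_
  else pvScanA start_hz pvStartsDescA 1

-- ===== PORT B =====
def pvStartsAscB : List Int :=
  [10000, 135000, 472000, 1800000, 3500000, 5250000, 7000000, 10100000,
   14000000, 18068000, 21000000, 24890000, 28000000, 50000000]

-- the while-loop binary search; fuel only guards totality (14 iterations suffice)
def pvBsearchB (s : Int) : Nat → Nat → Nat → Nat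
  | 0, lo, _ => lo
  | fuel + 1, lo, hi =>
    if lo < hi then
      let mid := (lo + hi) / 2
      if pvStartsAscB.getD mid 0 ≤ s then pvBsearchB s fuel (mid + 1) hi
      else pvBsearchB s fuel lo mid
    else lo

def resolve_scope_fixed_edge_range_py_alt (start_hz : Int) : Int :=
  if start_hz < 0 then 0  -- raise, excluded by Pre_
  else
    let lo := pvBsearchB start_hz 14 0 14
    if lo = 0 then 0  -- raise, excluded by Pre_
    else 15 - (lo : Int)

-- ===== PRECONDITION & SPEC =====
-- A raises ValueError when start_hz < 0 and when 0 ≤ start_hz < 10000 (below every band);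
-- Pre_ admits exactly the inputs on which A returns.
def Pre_resolve_scope_fixed_edge_range_py (start_hz : Int) : Prop := 10000 ≤ start_hz
instance (start_hz : Int) : Decidable (Pre_resolve_scope_fixed_edge_range_py start_hz) := by unfold Pre_resolve_scope_fixed_edge_range_py; infer_instance
def pvWitness_resolve_scope_fixed_edge_range_py : Int := 14000000

def Spec_resolve_scope_fixed_edge_range_py (start_hz : Int) (out : Int) : Prop := out = resolve_scope_fixed_edge_range_py_alt start_hz
instance (start_hz : Int) (out : Int) : Decidable (Spec_resolve_scope_fixed_edge_range_py start_hz out) := by unfold Spec_resolve_scope_fixed_edge_range_py; infer_instance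

-- ===== CLAIM (what is proved, stated in full; the proofs are below) =====
def Claim_equal_resolve_scope_fixed_edge_range_py : Prop := ∀ (start_hz : Int), Dom_resolve_scope_fixed_edge_range_py start_hz → Pre_resolve_scope_fixed_edge_range_py start_hz → Spec_resolve_scope_fixed_edge_range_py start_hz (resolve_scope_fixed_edge_range_py start_hz)

-- ===== LEMMAS AND PROOFS =====
set_option maxHeartbeats 2000000

-- ===== VERDICT (by name: the statement is the Claim_ definition above) =====
theorem resolve_scope_fixed_edge_range_py_spec : Claim_equal_resolve_scope_fixed_edge_range_py := by
  intro s _ hpre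
  unfold Pre_resolve_scope_fixed_edge_range_py at hpre
  unfold Spec_resolve_scope_fixed_edge_range_py
  unfold resolve_scope_fixed_edge_range_py resolve_scope_fixed_edge_range_py_alt
  by_cases h14 : (50000000:Int) ≤ s
  ·
    have c0 : (10000:Int) ≤ s := by omega
    have c1 : (135000:Int) ≤ s := by omega
    have c2 : (472000:Int) ≤ s := by omega
    have c3 : (1800000:Int) ≤ s := by omega
    have c4 : (3500000:Int) ≤ s := by omega
    have c5 : (5250000:Int) ≤ s := by omega
    have c6 : (7000000:Int) ≤ s := by omega
    have c7 : (10100000:Int) ≤ s := by omega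
    have c8 : (14000000:Int) ≤ s := by omega
    have c9 : (18068000:Int) ≤ s := by omega
    have c10 : (21000000:Int) ≤ s := by omega
    have c11 : (24890000:Int) ≤ s := by omega
    have c12 : (28000000:Int) ≤ s := by omega
    have c13 : (50000000:Int) ≤ s := by omega
    simp [pvScanA, pvBsearchB, pvStartsDescA, pvStartsAscB, List.getD, c0, c1, c2, c3, c4, c5, c6, c7, c8, c9, c10, c11, c12, c13]
  ·
    by_cases h13 : (28000000:Int) ≤ s
    ·
      have c0 : (10000:Int) ≤ s := by omega
      have c1 : (135000:Int) ≤ s := by omega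
      have c2 : (472000:Int) ≤ s := by omega
      have c3 : (1800000:Int) ≤ s := by omega
      have c4 : (3500000:Int) ≤ s := by omega
      have c5 : (5250000:Int) ≤ s := by omega
      have c6 : (7000000:Int) ≤ s := by omega
      have c7 : (10100000:Int) ≤ s := by omega
      have c8 : (14000000:Int) ≤ s := by omega
      have c9 : (18068000:Int) ≤ s := by omega
      have c10 : (21000000:Int) ≤ s := by omega
      have c11 : (24890000:Int) ≤ s := by omega
      have c12 : (28000000:Int) ≤ s := by omega
      have c13 : ¬ (50000000:Int) ≤ s := by omega
      simp [pvScanA, pvBsearchB, pvStartsDescA, pvStartsAscB, List.getD, c0, c1, c2, c3, c4, c5, c6, c7, c8, c9, c10, c11, c12, c13]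
    ·
      by_cases h12 : (24890000:Int) ≤ s
      ·
        have c0 : (10000:Int) ≤ s := by omega
        have c1 : (135000:Int) ≤ s := by omega
        have c2 : (472000:Int) ≤ s := by omega
        have c3 : (1800000:Int) ≤ s := by omega
        have c4 : (3500000:Int) ≤ s := by omega
        have c5 : (5250000:Int) ≤ s := by omega
        have c6 : (7000000:Int) ≤ s := by omega
        have c7 : (10100000:Int) ≤ s := by omega
        have c8 : (14000000:Int) ≤ s := by omega
        have c9 : (18068000:Int) ≤ s := by omega
        have c10 : (21000000:Int) ≤ s := by omega
        have c11 : (24890000:Int) ≤ s := by omega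
        have c12 : ¬ (28000000:Int) ≤ s := by omega
        have c13 : ¬ (50000000:Int) ≤ s := by omega
        simp [pvScanA, pvBsearchB, pvStartsDescA, pvStartsAscB, List.getD, c0, c1, c2, c3, c4, c5, c6, c7, c8, c9, c10, c11, c12, c13]
      ·
        by_cases h11 : (21000000:Int) ≤ s
        ·
          have c0 : (10000:Int) ≤ s := by omega
          have c1 : (135000:Int) ≤ s := by omega
          have c2 : (472000:Int) ≤ s := by omega
          have c3 : (1800000:Int) ≤ s := by omega
          have c4 : (3500000:Int) ≤ s := by omega
          have c5 : (5250000:Int) ≤ s := by omega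
          have c6 : (7000000:Int) ≤ s := by omega
          have c7 : (10100000:Int) ≤ s := by omega
          have c8 : (14000000:Int) ≤ s := by omega
          have c9 : (18068000:Int) ≤ s := by omega
          have c10 : (21000000:Int) ≤ s := by omega
          have c11 : ¬ (24890000:Int) ≤ s := by omega
          have c12 : ¬ (28000000:Int) ≤ s := by omega
          have c13 : ¬ (50000000:Int) ≤ s := by omega
          simp [pvScanA, pvBsearchB, pvStartsDescA, pvStartsAscB, List.getD, c0, c1, c2, c3, c4, c5, c6, c7, c8, c9, c10, c11, c12, c13]
        ·
          by_cases h10 : (18068000:Int) ≤ s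
          ·
            have c0 : (10000:Int) ≤ s := by omega
            have c1 : (135000:Int) ≤ s := by omega
            have c2 : (472000:Int) ≤ s := by omega
            have c3 : (1800000:Int) ≤ s := by omega
            have c4 : (3500000:Int) ≤ s := by omega
            have c5 : (5250000:Int) ≤ s := by omega
            have c6 : (7000000:Int) ≤ s := by omega
            have c7 : (10100000:Int) ≤ s := by omega
            have c8 : (14000000:Int) ≤ s := by omega
            have c9 : (18068000:Int) ≤ s := by omega
            have c10 : ¬ (21000000:Int) ≤ s := by omega
            have c11 : ¬ (24890000:Int) ≤ s := by omega
            have c12 : ¬ (28000000:Int) ≤ s := by omega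
            have c13 : ¬ (50000000:Int) ≤ s := by omega
            simp [pvScanA, pvBsearchB, pvStartsDescA, pvStartsAscB, List.getD, c0, c1, c2, c3, c4, c5, c6, c7, c8, c9, c10, c11, c12, c13]
          ·
            by_cases h9 : (14000000:Int) ≤ s
            ·
              have c0 : (10000:Int) ≤ s := by omega
              have c1 : (135000:Int) ≤ s := by omega
              have c2 : (472000:Int) ≤ s := by omega
              have c3 : (1800000:Int) ≤ s := by omega
              have c4 : (3500000:Int) ≤ s := by omega
              have c5 : (5250000:Int) ≤ s := by omega
              have c6 : (7000000:Int) ≤ s := by omega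
              have c7 : (10100000:Int) ≤ s := by omega
              have c8 : (14000000:Int) ≤ s := by omega
              have c9 : ¬ (18068000:Int) ≤ s := by omega
              have c10 : ¬ (21000000:Int) ≤ s := by omega
              have c11 : ¬ (24890000:Int) ≤ s := by omega
              have c12 : ¬ (28000000:Int) ≤ s := by omega
              have c13 : ¬ (50000000:Int) ≤ s := by omega
              simp [pvScanA, pvBsearchB, pvStartsDescA, pvStartsAscB, List.getD, c0, c1, c2, c3, c4, c5, c6, c7, c8, c9, c10, c11, c12, c13]
            ·
              by_cases h8 : (10100000:Int) ≤ s
              ·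
                have c0 : (10000:Int) ≤ s := by omega
                have c1 : (135000:Int) ≤ s := by omega
                have c2 : (472000:Int) ≤ s := by omega
                have c3 : (1800000:Int) ≤ s := by omega
                have c4 : (3500000:Int) ≤ s := by omega
                have c5 : (5250000:Int) ≤ s := by omega
                have c6 : (7000000:Int) ≤ s := by omega
                have c7 : (10100000:Int) ≤ s := by omega
                have c8 : ¬ (14000000:Int) ≤ s := by omega
                have c9 : ¬ (18068000:Int) ≤ s := by omega
                have c10 : ¬ (21000000:Int) ≤ s := by omega
                have c11 : ¬ (24890000:Int) ≤ s := by omega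
                have c12 : ¬ (28000000:Int) ≤ s := by omega
                have c13 : ¬ (50000000:Int) ≤ s := by omega
                simp [pvScanA, pvBsearchB, pvStartsDescA, pvStartsAscB, List.getD, c0, c1, c2, c3, c4, c5, c6, c7, c8, c9, c10, c11, c12, c13]
              ·
                by_cases h7 : (7000000:Int) ≤ s
                ·
                  have c0 : (10000:Int) ≤ s := by omega
                  have c1 : (135000:Int) ≤ s := by omega
                  have c2 : (472000:Int) ≤ s := by omega
                  have c3 : (1800000:Int) ≤ s := by omega
                  have c4 : (3500000:Int) ≤ s := by omega
                  have c5 : (5250000:Int) ≤ s := by omega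
                  have c6 : (7000000:Int) ≤ s := by omega
                  have c7 : ¬ (10100000:Int) ≤ s := by omega
                  have c8 : ¬ (14000000:Int) ≤ s := by omega
                  have c9 : ¬ (18068000:Int) ≤ s := by omega
                  have c10 : ¬ (21000000:Int) ≤ s := by omega
                  have c11 : ¬ (24890000:Int) ≤ s := by omega
                  have c12 : ¬ (28000000:Int) ≤ s := by omega
                  have c13 : ¬ (50000000:Int) ≤ s := by omega
                  simp [pvScanA, pvBsearchB, pvStartsDescA, pvStartsAscB, List.getD, c0, c1, c2, c3, c4, c5, c6, c7, c8, c9, c10, c11, c12, c13]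
                ·
                  by_cases h6 : (5250000:Int) ≤ s
                  ·
                    have c0 : (10000:Int) ≤ s := by omega
                    have c1 : (135000:Int) ≤ s := by omega
                    have c2 : (472000:Int) ≤ s := by omega
                    have c3 : (1800000:Int) ≤ s := by omega
                    have c4 : (3500000:Int) ≤ s := by omega
                    have c5 : (5250000:Int) ≤ s := by omega
                    have c6 : ¬ (7000000:Int) ≤ s := by omega
                    have c7 : ¬ (10100000:Int) ≤ s := by omega
                    have c8 : ¬ (14000000:Int) ≤ s := by omega
                    have c9 : ¬ (18068000:Int) ≤ s := by omega
                    have c10 : ¬ (21000000:Int) ≤ s := by omega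
                    have c11 : ¬ (24890000:Int) ≤ s := by omega
                    have c12 : ¬ (28000000:Int) ≤ s := by omega
                    have c13 : ¬ (50000000:Int) ≤ s := by omega
                    simp [pvScanA, pvBsearchB, pvStartsDescA, pvStartsAscB, List.getD, c0, c1, c2, c3, c4, c5, c6, c7, c8, c9, c10, c11, c12, c13]
                  ·
                    by_cases h5 : (3500000:Int) ≤ s
                    ·
                      have c0 : (10000:Int) ≤ s := by omega
                      have c1 : (135000:Int) ≤ s := by omega
                      have c2 : (472000:Int) ≤ s := by omega
                      have c3 : (1800000:Int) ≤ s := by omega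
                      have c4 : (3500000:Int) ≤ s := by omega
                      have c5 : ¬ (5250000:Int) ≤ s := by omega
                      have c6 : ¬ (7000000:Int) ≤ s := by omega
                      have c7 : ¬ (10100000:Int) ≤ s := by omega
                      have c8 : ¬ (14000000:Int) ≤ s := by omega
                      have c9 : ¬ (18068000:Int) ≤ s := by omega
                      have c10 : ¬ (21000000:Int) ≤ s := by omega
                      have c11 : ¬ (24890000:Int) ≤ s := by omega
                      have c12 : ¬ (28000000:Int) ≤ s := by omega
                      have c13 : ¬ (50000000:Int) ≤ s := by omega
                      simp [pvScanA, pvBsearchB, pvStartsDescA, pvStartsAscB, List.getD, c0, c1, c2, c3, c4, c5, c6, c7, c8, c9, c10, c11, c12, c13]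
                    ·
                      by_cases h4 : (1800000:Int) ≤ s
                      ·
                        have c0 : (10000:Int) ≤ s := by omega
                        have c1 : (135000:Int) ≤ s := by omega
                        have c2 : (472000:Int) ≤ s := by omega
                        have c3 : (1800000:Int) ≤ s := by omega
                        have c4 : ¬ (3500000:Int) ≤ s := by omega
                        have c5 : ¬ (5250000:Int) ≤ s := by omega
                        have c6 : ¬ (7000000:Int) ≤ s := by omega
                        have c7 : ¬ (10100000:Int) ≤ s := by omega
                        have c8 : ¬ (14000000:Int) ≤ s := by omega
                        have c9 : ¬ (18068000:Int) ≤ s := by omega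
                        have c10 : ¬ (21000000:Int) ≤ s := by omega
                        have c11 : ¬ (24890000:Int) ≤ s := by omega
                        have c12 : ¬ (28000000:Int) ≤ s := by omega
                        have c13 : ¬ (50000000:Int) ≤ s := by omega
                        simp [pvScanA, pvBsearchB, pvStartsDescA, pvStartsAscB, List.getD, c0, c1, c2, c3, c4, c5, c6, c7, c8, c9, c10, c11, c12, c13]
                      ·
                        by_cases h3 : (472000:Int) ≤ s
                        ·
                          have c0 : (10000:Int) ≤ s := by omega
                          have c1 : (135000:Int) ≤ s := by omega
                          have c2 : (472000:Int) ≤ s := by omega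
                          have c3 : ¬ (1800000:Int) ≤ s := by omega
                          have c4 : ¬ (3500000:Int) ≤ s := by omega
                          have c5 : ¬ (5250000:Int) ≤ s := by omega
                          have c6 : ¬ (7000000:Int) ≤ s := by omega
                          have c7 : ¬ (10100000:Int) ≤ s := by omega
                          have c8 : ¬ (14000000:Int) ≤ s := by omega
                          have c9 : ¬ (18068000:Int) ≤ s := by omega
                          have c10 : ¬ (21000000:Int) ≤ s := by omega
                          have c11 : ¬ (24890000:Int) ≤ s := by omega
                          have c12 : ¬ (28000000:Int) ≤ s := by omega
                          have c13 : ¬ (50000000:Int) ≤ s := by omega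
                          simp [pvScanA, pvBsearchB, pvStartsDescA, pvStartsAscB, List.getD, c0, c1, c2, c3, c4, c5, c6, c7, c8, c9, c10, c11, c12, c13]
                        ·
                          by_cases h2 : (135000:Int) ≤ s
                          ·
                            have c0 : (10000:Int) ≤ s := by omega
                            have c1 : (135000:Int) ≤ s := by omega
                            have c2 : ¬ (472000:Int) ≤ s := by omega
                            have c3 : ¬ (1800000:Int) ≤ s := by omega
                            have c4 : ¬ (3500000:Int) ≤ s := by omega
                            have c5 : ¬ (5250000:Int) ≤ s := by omega
                            have c6 : ¬ (7000000:Int) ≤ s := by omega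
                            have c7 : ¬ (10100000:Int) ≤ s := by omega
                            have c8 : ¬ (14000000:Int) ≤ s := by omega
                            have c9 : ¬ (18068000:Int) ≤ s := by omega
                            have c10 : ¬ (21000000:Int) ≤ s := by omega
                            have c11 : ¬ (24890000:Int) ≤ s := by omega
                            have c12 : ¬ (28000000:Int) ≤ s := by omega
                            have c13 : ¬ (50000000:Int) ≤ s := by omega
                            simp [pvScanA, pvBsearchB, pvStartsDescA, pvStartsAscB, List.getD, c0, c1, c2, c3, c4, c5, c6, c7, c8, c9, c10, c11, c12, c13]
                          ·
                            have c0 : (10000:Int) ≤ s := by omega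
                            have c1 : ¬ (135000:Int) ≤ s := by omega
                            have c2 : ¬ (472000:Int) ≤ s := by omega
                            have c3 : ¬ (1800000:Int) ≤ s := by omega
                            have c4 : ¬ (3500000:Int) ≤ s := by omega
                            have c5 : ¬ (5250000:Int) ≤ s := by omega
                            have c6 : ¬ (7000000:Int) ≤ s := by omega
                            have c7 : ¬ (10100000:Int) ≤ s := by omega
                            have c8 : ¬ (14000000:Int) ≤ s := by omega
                            have c9 : ¬ (18068000:Int) ≤ s := by omega
                            have c10 : ¬ (21000000:Int) ≤ s := by omega
                            have c11 : ¬ (24890000:Int) ≤ s := by omega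
                            have c12 : ¬ (28000000:Int) ≤ s := by omega
                            have c13 : ¬ (50000000:Int) ≤ s := by omega
                            simp [pvScanA, pvBsearchB, pvStartsDescA, pvStartsAscB, List.getD, c0, c1, c2, c3, c4, c5, c6, c7, c8, c9, c10, c11, c12, c13]
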